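-- pv_equiv track=rewrite | github.com/foo123/Dromeo | src/python/Dromeo.py | is_numeric_array
-- ===== SOURCE A (Python) =====
-- def array_keys(o):
--     if isinstance(o, (list,tuple)): return list(map(str, range(0,len(o))))
--     if isinstance(o, dict): return list(o.keys())
--     return []
--
-- def is_numeric_array( o ):
--     if isinstance(o,(list,tuple)): return True
--     if isinstance(o,dict):
--         k = array_keys(o)
--         i = 0
--         l = len(k)
--         while i < l:
--             if str(i) not in k: return False
--             i += 1
--         return True
--     return False
-- ===== SOURCE B (Python) =====
-- def is_numeric_array(o):
--     # Per-key validation: a key passes iff it is the canonical decimal string of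
--     # some integer in [0, n).  Canonical decimals compare numerically under the
--     # shortlex order (shorter first, then lexicographic), so "value < n" is the
--     # shortlex comparison against bound = str(n-1); since a dict's n keys are
--     # distinct, all keys pass iff the key set is exactly {str(0),...,str(n-1)}.
--     if isinstance(o, (list, tuple)):
--         return True
--     if not isinstance(o, dict):
--         return False
--     n = len(o)
--     if n == 0:
--         return True
--     bound = str(n - 1)
--     for key in o:
--         if not isinstance(key, str):
--             return False
--         if key == '' or any(c < '0' or c > '9' for c in key):
--             return False
--         if len(key) > 1 and key[0] == '0':
--             return False
--         if len(key) > len(bound) or (len(key) == len(bound) and key > bound):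
--             return False
--     return True
-- ===== Notes on version B (the rewrite author's own statement) =====
-- stated objective: alternative
-- what changed: Instead of generating each expected key str(i) and scanning the key list for it, B makes one pass that validates every key locally (all ASCII digits, no leading zero, shortlex-at-most str(n-1)) and relies on the pigeonhole principle over the n distinct dict keys; no expected-key collection is ever built.
import Mathlib
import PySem

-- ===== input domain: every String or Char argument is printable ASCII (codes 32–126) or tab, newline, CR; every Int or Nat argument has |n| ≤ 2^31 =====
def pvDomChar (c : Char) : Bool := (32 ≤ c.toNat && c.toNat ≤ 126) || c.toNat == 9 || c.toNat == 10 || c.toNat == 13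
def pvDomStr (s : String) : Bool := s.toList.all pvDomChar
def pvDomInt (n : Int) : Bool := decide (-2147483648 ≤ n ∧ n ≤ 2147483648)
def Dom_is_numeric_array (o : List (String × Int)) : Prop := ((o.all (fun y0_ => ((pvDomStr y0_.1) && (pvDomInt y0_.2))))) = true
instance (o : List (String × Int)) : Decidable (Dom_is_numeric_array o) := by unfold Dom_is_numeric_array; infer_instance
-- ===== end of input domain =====

-- B replaces A's generate-and-scan (for each i < n, scan the key list for str(i))
-- by a single pass that validates each key locally — canonical decimal string,
-- shortlex-bounded by str(n-1) — with no expected-key generation at all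
-- (objective: alternative; correct by pigeonhole on the n distinct keys).
-- The input type is the dict case of the Python function; the list/tuple → True and
-- non-dict → False branches are outside the List (String × Int) signature.

-- ===== PORT A =====
def is_numeric_array (o : List (String × Int)) : Bool :=
  -- k = array_keys(o) = list(o.keys())
  let k := (PySem.Dict.ofList o).keys
  -- l = len(k); while i < l: if str(i) not in k: return False; i += 1; return True
  let l := k.length
  (List.range l).all (fun i => decide (PySem.Int.toStr (i : Int) ∈ k))

-- ===== PORT B =====
-- the body of B's per-key loop: reject non-digit or empty, reject a leading zero
-- (unless the key is the single char '0'), reject keys shortlex-above the bound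
def pvKeyOk (bound : List Char) (key : List Char) : Bool :=
  if key.isEmpty || key.any (fun c => decide (c < '0') || decide ('9' < c)) then false
  else if decide (1 < key.length) && (key.headD ' ' == '0') then false
  else if decide (bound.length < key.length)
          || (key.length == bound.length && decide (bound < key)) then false
  else true

def is_numeric_array_alt (o : List (String × Int)) : Bool :=
  let d := PySem.Dict.ofList o
  let n := d.size
  if n = 0 then true
  else
    -- bound = str(n - 1); all keys pass the per-key validation
    let bound := PySem.Int.toStr ((n : Int) - 1)
    d.keys.all (fun key => pvKeyOk bound.toList key.toList)

-- ===== PRECONDITION & SPEC =====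
def Spec_is_numeric_array (o : List (String × Int)) (out : Bool) : Prop := out = is_numeric_array_alt o
instance (o : List (String × Int)) (out : Bool) : Decidable (Spec_is_numeric_array o out) := by unfold Spec_is_numeric_array; infer_instance

-- ===== CLAIM (what is proved, stated in full; the proofs are below) =====
def Claim_equal_is_numeric_array : Prop := ∀ (o : List (String × Int)), Dom_is_numeric_array o → Spec_is_numeric_array o (is_numeric_array o)

-- ===== LEMMAS AND PROOFS =====

-- decoding a digit string: one Horner step per char
def pvStep (a : Nat) (c : Char) : Nat := 10 * a + (c.toNat - 48)

def pvIsDigit (c : Char) : Bool := decide ('0' ≤ c) && decide (c ≤ '9')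

theorem pvIsDigit_toNat {c : Char} (h : pvIsDigit c = true) :
    48 ≤ c.toNat ∧ c.toNat ≤ 57 := by
  unfold pvIsDigit at h
  rw [Bool.and_eq_true, decide_eq_true_iff, decide_eq_true_iff] at h
  obtain ⟨h1, h2⟩ := h
  rw [Char.le_def] at h1 h2
  exact ⟨UInt32.le_iff_toNat_le.mp h1, UInt32.le_iff_toNat_le.mp h2⟩

theorem pvDigitChar_toNat {m : Nat} (h : m < 10) : (Nat.digitChar m).toNat = 48 + m := by
  interval_cases m <;> rfl

theorem pvDigitChar_isDigit {m : Nat} (h : m < 10) : pvIsDigit (Nat.digitChar m) = true := by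
  interval_cases m <;> decide

theorem pvDigitChar_ne_zeroChar {m : Nat} (h1 : 1 ≤ m) (h : m < 10) :
    Nat.digitChar m ≠ '0' := by
  interval_cases m <;> decide

theorem pvDigitChar_of_digit {c : Char} (h : pvIsDigit c = true) :
    Nat.digitChar (c.toNat - 48) = c := by
  obtain ⟨h1, h2⟩ := pvIsDigit_toNat h
  refine Char.ext (UInt32.toNat_inj.mp ?_)
  have := pvDigitChar_toNat (m := c.toNat - 48) (by omega)
  change (Nat.digitChar (c.toNat - 48)).toNat = c.toNat
  omega


theorem pvHeadD_append {l t : List Char} (x : Char) (h : l ≠ []) :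
    (l ++ t).headD x = l.headD x := by
  cases l with
  | nil => exact absurd rfl h
  | cons a l => rfl

-- toDigitsCore: fuel irrelevance and accumulator append
theorem pvCore_fuel : ∀ (f g n : Nat) (acc : List Char), n < f → n < g →
    Nat.toDigitsCore 10 f n acc = Nat.toDigitsCore 10 g n acc := by
  intro f
  induction f with
  | zero => intro g n acc h; omega
  | succ f ih =>
    intro g n acc hf hg
    obtain ⟨g', rfl⟩ : ∃ g', g = g' + 1 := ⟨g - 1, by omega⟩
    show (if n / 10 = 0 then (n % 10).digitChar :: acc
          else Nat.toDigitsCore 10 f (n / 10) ((n % 10).digitChar :: acc))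
        = (if n / 10 = 0 then (n % 10).digitChar :: acc
          else Nat.toDigitsCore 10 g' (n / 10) ((n % 10).digitChar :: acc))
    by_cases h10 : n / 10 = 0
    · rw [if_pos h10, if_pos h10]
    · rw [if_neg h10, if_neg h10]
      have hn : n / 10 < n := Nat.div_lt_self (by omega) (by omega)
      exact ih g' (n / 10) _ (by omega) (by omega)

theorem pvCore_append : ∀ (f n : Nat) (acc : List Char), n < f →
    Nat.toDigitsCore 10 f n acc = Nat.toDigitsCore 10 f n [] ++ acc := by
  intro f
  induction f with
  | zero => intro n acc h; omega
  | succ f ih =>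
    intro n acc h
    show (if n / 10 = 0 then (n % 10).digitChar :: acc
          else Nat.toDigitsCore 10 f (n / 10) ((n % 10).digitChar :: acc))
        = (if n / 10 = 0 then (n % 10).digitChar :: ([] : List Char)
          else Nat.toDigitsCore 10 f (n / 10) [(n % 10).digitChar]) ++ acc
    by_cases h10 : n / 10 = 0
    · rw [if_pos h10, if_pos h10]; rfl
    · have hn : n / 10 < n := Nat.div_lt_self (by omega) (by omega)
      rw [if_neg h10, if_neg h10, ih (n / 10) _ (by omega),
          ih (n / 10) [(n % 10).digitChar] (by omega), List.append_assoc]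
      rfl

theorem pvDigits_base {n : Nat} (h : n < 10) :
    Nat.toDigits 10 n = [Nat.digitChar n] := by
  show (if n / 10 = 0 then (n % 10).digitChar :: ([] : List Char)
        else Nat.toDigitsCore 10 n (n / 10) [(n % 10).digitChar]) = [Nat.digitChar n]
  rw [if_pos (by omega), Nat.mod_eq_of_lt h]

theorem pvDigits_rec {n : Nat} (h : 10 ≤ n) :
    Nat.toDigits 10 n = Nat.toDigits 10 (n / 10) ++ [Nat.digitChar (n % 10)] := by
  have h10 : ¬ n / 10 = 0 := by omega
  have hn : n / 10 < n := Nat.div_lt_self (by omega) (by omega)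
  show (if n / 10 = 0 then (n % 10).digitChar :: ([] : List Char)
        else Nat.toDigitsCore 10 n (n / 10) [(n % 10).digitChar]) = _
  rw [if_neg h10, pvCore_append n (n / 10) _ (by omega),
      pvCore_fuel n (n / 10 + 1) (n / 10) [] (by omega) (by omega)]
  rfl

-- structural properties of toDigits 10
theorem pvDigits_ne_nil (n : Nat) : Nat.toDigits 10 n ≠ [] := by
  by_cases h : n < 10
  · rw [pvDigits_base h]; simp
  · rw [pvDigits_rec (by omega)]; simp

theorem pvDigits_all_digit (n : Nat) : (Nat.toDigits 10 n).all pvIsDigit = true := by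
  induction n using Nat.strong_induction_on with
  | _ n ih =>
    by_cases h : n < 10
    · rw [pvDigits_base h]; simp [pvDigitChar_isDigit h]
    · rw [pvDigits_rec (by omega)]
      have hn : n / 10 < n := Nat.div_lt_self (by omega) (by omega)
      simp only [List.all_append, Bool.and_eq_true]
      exact ⟨ih _ hn, by simp [pvDigitChar_isDigit (Nat.mod_lt _ (by omega))]⟩

theorem pvDigits_head_ne_zero {n : Nat} (h1 : 1 ≤ n) :
    (Nat.toDigits 10 n).headD ' ' ≠ '0' := by
  induction n using Nat.strong_induction_on with
  | _ n ih =>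
    by_cases h : n < 10
    · rw [pvDigits_base h]
      exact pvDigitChar_ne_zeroChar h1 h
    · rw [pvDigits_rec (by omega)]
      have hn : n / 10 < n := Nat.div_lt_self (by omega) (by omega)
      have h1' : 1 ≤ n / 10 := by omega
      rw [pvHeadD_append ' ' (pvDigits_ne_nil (n / 10))]
      exact ih _ hn h1'

-- decoding: foldl pvStep
theorem pvFoldl_split (cs : List Char) : ∀ a : Nat,
    List.foldl pvStep a cs = a * 10 ^ cs.length + List.foldl pvStep 0 cs := by
  induction cs with
  | nil => intro a; simp
  | cons c cs ih =>
    intro a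
    simp only [List.foldl_cons, List.length_cons]
    rw [ih (pvStep a c), ih (pvStep 0 c)]
    unfold pvStep
    ring_nf

theorem pvDecode_lt {cs : List Char} (h : cs.all pvIsDigit = true) :
    List.foldl pvStep 0 cs < 10 ^ cs.length := by
  induction cs with
  | nil => simp
  | cons c cs ih =>
    simp only [List.all_cons, Bool.and_eq_true] at h
    obtain ⟨hc, hcs⟩ := h
    obtain ⟨h1, h2⟩ := pvIsDigit_toNat hc
    simp only [List.foldl_cons, List.length_cons]
    rw [pvFoldl_split]
    have := ih hcs
    have hd : pvStep 0 c ≤ 9 := by unfold pvStep; omega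
    have hp : (pvStep 0 c) * 10 ^ cs.length ≤ 9 * 10 ^ cs.length :=
      Nat.mul_le_mul_right _ hd
    rw [pow_succ]
    omega

theorem pvDecode_pos {c : Char} {cs : List Char} (hc : pvIsDigit c = true)
    (hne : c ≠ '0') : 1 ≤ List.foldl pvStep 0 (c :: cs) := by
  obtain ⟨h1, h2⟩ := pvIsDigit_toNat hc
  have hd : 1 ≤ pvStep 0 c := by
    unfold pvStep
    have : c.toNat ≠ 48 := by
      intro hc48
      exact hne (by
        have := pvDigitChar_of_digit hc
        rw [hc48] at this
        simpa using this.symm)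
    omega
  simp only [List.foldl_cons]
  rw [pvFoldl_split]
  have : 1 * 1 ≤ pvStep 0 c * 10 ^ cs.length :=
    Nat.mul_le_mul hd (Nat.one_le_pow _ _ (by omega))
  omega

-- decode of toDigits (Horner evaluation inverts printing)
def pvPow10 (n : Nat) : Nat :=
  if n < 10 then 10 else 10 * pvPow10 (n / 10)
decreasing_by exact Nat.div_lt_self (by omega) (by omega)

theorem pvToDigitsCore_foldl :
    ∀ (f n : Nat) (acc : List Char) (a : Nat), n < f →
      List.foldl pvStep a (Nat.toDigitsCore 10 f n acc)
        = List.foldl pvStep (a * pvPow10 n + n) acc := by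
  intro f
  induction f with
  | zero => intro n acc a h; omega
  | succ f ih =>
    intro n acc a h
    rw [show Nat.toDigitsCore 10 (f + 1) n acc
        = (if n / 10 = 0 then (n % 10).digitChar :: acc
           else Nat.toDigitsCore 10 f (n / 10) ((n % 10).digitChar :: acc)) from rfl]
    have hd : ((n % 10).digitChar).toNat = 48 + n % 10 :=
      pvDigitChar_toNat (Nat.mod_lt _ (by omega))
    by_cases h10 : n / 10 = 0
    · have hn : n < 10 := by omega
      have hp : pvPow10 n = 10 := by rw [pvPow10, if_pos hn]
      rw [if_pos h10, List.foldl_cons, hp]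
      have hs : pvStep a ((n % 10).digitChar) = a * 10 + n := by
        unfold pvStep; rw [hd]; omega
      rw [hs]
    · have hp : pvPow10 n = 10 * pvPow10 (n / 10) := by
        rw [pvPow10, if_neg (by omega : ¬ n < 10)]
      rw [if_neg h10, ih (n / 10) _ a (by omega), List.foldl_cons, hp]
      have hs : pvStep (a * pvPow10 (n / 10) + n / 10) ((n % 10).digitChar)
          = a * (10 * pvPow10 (n / 10)) + n := by
        unfold pvStep
        rw [hd]
        have hring : a * (10 * pvPow10 (n / 10)) = 10 * (a * pvPow10 (n / 10)) := by ring
        rw [hring]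
        omega
      rw [hs]

theorem pvDecode_toDigits (n : Nat) : List.foldl pvStep 0 (Nat.toDigits 10 n) = n := by
  unfold Nat.toDigits
  rw [pvToDigitsCore_foldl (n + 1) n [] 0 (by omega)]
  simp [List.foldl]

theorem pvDigits_inj {a b : Nat} (h : Nat.toDigits 10 a = Nat.toDigits 10 b) : a = b := by
  have := congrArg (List.foldl pvStep 0) h
  rwa [pvDecode_toDigits, pvDecode_toDigits] at this

-- roundtrip the other way: printing inverts decoding on canonical digit strings
theorem pvRoundtrip : ∀ cs : List Char, cs.all pvIsDigit = true → cs ≠ [] →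
    (cs.length = 1 ∨ cs.headD ' ' ≠ '0') →
    Nat.toDigits 10 (List.foldl pvStep 0 cs) = cs := by
  intro cs
  induction cs using List.reverseRecOn with
  | nil => intro _ h; exact absurd rfl h
  | append_singleton cs c ih =>
    intro hdig _ hcanon
    simp only [List.all_append, List.all_cons, List.all_nil, Bool.and_eq_true] at hdig
    obtain ⟨hcs, hc, -⟩ := hdig
    obtain ⟨hc48, hc57⟩ := pvIsDigit_toNat hc
    cases cs with
    | nil =>
      -- single digit
      simp only [List.nil_append, List.foldl_cons, List.foldl_nil]
      have hlt : pvStep 0 c < 10 := by unfold pvStep; omega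
      rw [pvDigits_base hlt]
      unfold pvStep
      simp only [Nat.mul_zero, Nat.zero_add]
      rw [pvDigitChar_of_digit hc]
    | cons c0 cs0 =>
      -- at least two digits: head is not '0'
      have hhead : (c0 :: cs0).headD ' ' ≠ '0' := by
        rcases hcanon with h1 | h0
        · exfalso; simp at h1
        · rwa [pvHeadD_append ' ' (by simp)] at h0
      have hc0 : pvIsDigit c0 = true := by
        simp only [List.all_cons, Bool.and_eq_true] at hcs
        exact hcs.1
      have hm' : 1 ≤ List.foldl pvStep 0 (c0 :: cs0) :=
        pvDecode_pos hc0 (by simpa using hhead)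
      have hsplit : List.foldl pvStep 0 ((c0 :: cs0) ++ [c])
          = 10 * List.foldl pvStep 0 (c0 :: cs0) + (c.toNat - 48) := by
        rw [List.foldl_append]
        rfl
      set m' := List.foldl pvStep 0 (c0 :: cs0) with hm'def
      have hm10 : 10 ≤ 10 * m' + (c.toNat - 48) := by omega
      rw [hsplit, pvDigits_rec hm10]
      have hdiv : (10 * m' + (c.toNat - 48)) / 10 = m' := by omega
      have hmod : (10 * m' + (c.toNat - 48)) % 10 = c.toNat - 48 := by omega
      rw [hdiv, hmod, pvDigitChar_of_digit hc,
          ih hcs (by simp) (Or.inr hhead)]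

-- length of toDigits vs magnitude
theorem pvLt_pow (n : Nat) : n < 10 ^ (Nat.toDigits 10 n).length := by
  have h := pvDecode_lt (pvDigits_all_digit n)
  rwa [pvDecode_toDigits] at h

theorem pvPow_le {n : Nat} (h1 : 1 ≤ n) :
    10 ^ ((Nat.toDigits 10 n).length - 1) ≤ n := by
  induction n using Nat.strong_induction_on with
  | _ n ih =>
    by_cases h : n < 10
    · rw [pvDigits_base h]; simpa using h1
    · have hn : n / 10 < n := Nat.div_lt_self (by omega) (by omega)
      have h1' : 1 ≤ n / 10 := by omega
      have := ih _ hn h1'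
      rw [pvDigits_rec (by omega)]
      have hlen : (Nat.toDigits 10 (n / 10)).length ≥ 1 :=
        List.length_pos_iff.mpr (pvDigits_ne_nil _)
      rw [List.length_append, List.length_cons, List.length_nil]
      have heq : (Nat.toDigits 10 (n / 10)).length + 1 - 1
          = ((Nat.toDigits 10 (n / 10)).length - 1) + 1 := by omega
      rw [heq, pow_succ]
      calc 10 ^ ((Nat.toDigits 10 (n / 10)).length - 1) * 10 ≤ (n / 10) * 10 :=
            Nat.mul_le_mul_right _ this
        _ ≤ n := by omega

-- lexicographic order of equal-length digit strings is numeric order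
theorem pvLex_decode : ∀ cs ds : List Char, cs.length = ds.length →
    cs.all pvIsDigit = true → ds.all pvIsDigit = true → cs < ds →
    List.foldl pvStep 0 cs < List.foldl pvStep 0 ds := by
  intro cs
  induction cs with
  | nil =>
    intro ds hlen _ _ hlt
    exfalso
    have : ds = [] := by cases ds <;> simp_all
    subst this
    exact absurd hlt (by simp)
  | cons c cs ih =>
    intro ds hlen hcd hdd hlt
    obtain ⟨d, ds', rfl⟩ : ∃ d ds', ds = d :: ds' := by
      cases ds
      · simp at hlen
      · exact ⟨_, _, rfl⟩
    simp only [List.all_cons, Bool.and_eq_true] at hcd hdd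
    obtain ⟨hc, hcs⟩ := hcd
    obtain ⟨hd, hds⟩ := hdd
    have hlen' : cs.length = ds'.length := by simpa using hlen
    have hlt' : List.Lex (· < ·) (c :: cs) (d :: ds') := hlt
    simp only [List.foldl_cons]
    rw [pvFoldl_split cs, pvFoldl_split ds', hlen']
    cases hlt' with
    | cons h =>
      have := ih ds' hlen' hcs hds h
      omega
    | rel h =>
      -- head strictly smaller: c < d as chars
      obtain ⟨hc1, hc2⟩ := pvIsDigit_toNat hc
      obtain ⟨hd1, hd2⟩ := pvIsDigit_toNat hd
      have hcd : c.toNat < d.toNat := by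
        rw [Char.lt_def] at h
        exact UInt32.lt_iff_toNat_lt.mp h
      have hstep : pvStep 0 c + 1 ≤ pvStep 0 d := by unfold pvStep; omega
      have hr : List.foldl pvStep 0 cs < 10 ^ ds'.length := by
        rw [← hlen']; exact pvDecode_lt hcs
      have h1 : (pvStep 0 c) * 10 ^ ds'.length + 10 ^ ds'.length
          ≤ (pvStep 0 d) * 10 ^ ds'.length := by
        have := Nat.mul_le_mul_right (10 ^ ds'.length) hstep
        calc (pvStep 0 c) * 10 ^ ds'.length + 10 ^ ds'.length
            = (pvStep 0 c + 1) * 10 ^ ds'.length := by ring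
          _ ≤ (pvStep 0 d) * 10 ^ ds'.length := this
      omega

-- shortlex on canonical decimals is numeric order
def pvSLt (cs ds : List Char) : Prop :=
  cs.length < ds.length ∨ (cs.length = ds.length ∧ cs < ds)

theorem pvSLt_of_lt {a b : Nat} (h : a < b) :
    pvSLt (Nat.toDigits 10 a) (Nat.toDigits 10 b) := by
  have hlab : (Nat.toDigits 10 a).length ≤ (Nat.toDigits 10 b).length := by
    by_contra hgt
    push_neg at hgt
    have ha1 : 1 ≤ a := by
      by_contra h0
      have : a = 0 := by omega
      subst this
      have : (Nat.toDigits 10 0).length = 1 := by rw [pvDigits_base (by omega)]; rfl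
      have := List.length_pos_iff.mpr (pvDigits_ne_nil b)
      omega
    have h1 : 10 ^ (Nat.toDigits 10 b).length ≤ 10 ^ ((Nat.toDigits 10 a).length - 1) :=
      Nat.pow_le_pow_right (by omega) (by omega)
    have h2 := pvLt_pow b
    have h3 := pvPow_le ha1
    omega
  rcases Nat.lt_or_ge (Nat.toDigits 10 a).length (Nat.toDigits 10 b).length with hl | hl
  · exact Or.inl hl
  · have hlen : (Nat.toDigits 10 a).length = (Nat.toDigits 10 b).length := by omega
    refine Or.inr ⟨hlen, ?_⟩
    have hne : Nat.toDigits 10 a ≠ Nat.toDigits 10 b := fun he => by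
      have := pvDigits_inj he; omega
    rcases lt_trichotomy (Nat.toDigits 10 a) (Nat.toDigits 10 b) with hlt | he | hgt
    · exact hlt
    · exact absurd he hne
    · exfalso
      have := pvLex_decode _ _ hlen.symm (pvDigits_all_digit b) (pvDigits_all_digit a) hgt
      rw [pvDecode_toDigits, pvDecode_toDigits] at this
      omega

theorem pvSLt_iff {a b : Nat} :
    pvSLt (Nat.toDigits 10 a) (Nat.toDigits 10 b) ↔ a < b := by
  constructor
  · intro h
    rcases lt_trichotomy a b with hlt | rfl | hgt
    · exact hlt
    · exfalso
      rcases h with h | ⟨-, h⟩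
      · omega
      · exact absurd h (lt_irrefl _)
    · exfalso
      rcases h, pvSLt_of_lt hgt with ⟨h | ⟨he, h⟩, h' | ⟨he', h'⟩⟩
      all_goals first
        | omega
        | exact absurd (h.trans h') (lt_irrefl _)
  · exact pvSLt_of_lt

-- the per-key check accepts exactly the decimals of 0..n-1
theorem pvKeyOk_iff {n : Nat} (hn : 0 < n) (cs : List Char) :
    pvKeyOk (Nat.toDigits 10 (n - 1)) cs = true ↔ ∃ i, i < n ∧ cs = Nat.toDigits 10 i := by
  unfold pvKeyOk
  constructor
  · intro h
    split_ifs at h with h1 h2 h3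
    rw [Bool.not_eq_true] at h1 h2 h3
    have hnonnil : cs ≠ [] := by
      intro rfl'; subst rfl'; simp at h1
    have hdig : cs.all pvIsDigit = true := by
      rw [Bool.or_eq_false_iff] at h1
      have := h1.2
      rw [List.any_eq_false] at this
      rw [List.all_eq_true]
      intro c hc
      have := this c hc
      rw [Bool.not_eq_true] at this
      unfold pvIsDigit
      rw [Bool.or_eq_false_iff, decide_eq_false_iff_not, decide_eq_false_iff_not] at this
      simp only [Bool.and_eq_true, decide_eq_true_iff]
      exact ⟨not_lt.mp this.1, not_lt.mp this.2⟩
    have hcanon : cs.length = 1 ∨ cs.headD ' ' ≠ '0' := by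
      rw [Bool.and_eq_false_iff] at h2
      rcases h2 with h2 | h2
      · left
        rw [decide_eq_false_iff_not] at h2
        have : 1 ≤ cs.length := List.length_pos_iff.mpr hnonnil
        omega
      · right
        intro he
        rw [he] at h2
        simp at h2
    refine ⟨List.foldl pvStep 0 cs, ?_, (pvRoundtrip cs hdig hnonnil hcanon).symm⟩
    -- bound: ¬ pvSLt (toDigits (n-1)) cs, and cs = toDigits (decode cs)
    rw [Bool.or_eq_false_iff, Bool.and_eq_false_iff] at h3
    obtain ⟨h3a, h3b⟩ := h3
    rw [decide_eq_false_iff_not, not_lt] at h3a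
    have hcs : cs = Nat.toDigits 10 (List.foldl pvStep 0 cs) :=
      (pvRoundtrip cs hdig hnonnil hcanon).symm
    have hnot : ¬ pvSLt (Nat.toDigits 10 (n - 1)) cs := by
      intro hs
      rcases hs with hs | ⟨he, hs⟩
      · omega
      · rcases h3b with h3b | h3b
        · rw [beq_eq_false_iff_ne] at h3b; omega
        · rw [decide_eq_false_iff_not] at h3b; exact h3b hs
    rw [hcs] at hnot
    rw [pvSLt_iff] at hnot
    omega
  · rintro ⟨i, hi, rfl⟩
    have hdig := pvDigits_all_digit i
    have hnonnil := pvDigits_ne_nil i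
    rw [if_neg, if_neg, if_neg]
    · -- bound check passes: ¬ (n-1 < i), via shortlex
      rw [Bool.not_eq_true]
      have hle : ¬ pvSLt (Nat.toDigits 10 (n - 1)) (Nat.toDigits 10 i) := by
        rw [pvSLt_iff]; omega
      unfold pvSLt at hle
      push_neg at hle
      obtain ⟨hle1, hle2⟩ := hle
      rw [Bool.or_eq_false_iff, Bool.and_eq_false_iff]
      refine ⟨by rw [decide_eq_false_iff_not]; exact not_lt.mpr hle1, ?_⟩
      by_cases heq : (Nat.toDigits 10 i).length = (Nat.toDigits 10 (n - 1)).length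
      · right
        rw [decide_eq_false_iff_not]
        exact not_lt.mpr (hle2 heq.symm)
      · left
        rw [beq_eq_false_iff_ne]
        exact heq
    · -- no leading zero
      rw [Bool.not_eq_true, Bool.and_eq_false_iff]
      by_cases h1 : i < 10
      · left
        rw [decide_eq_false_iff_not, not_lt, pvDigits_base h1]
        rfl
      · right
        have := pvDigits_head_ne_zero (n := i) (by omega)
        rw [beq_eq_false_iff_ne]
        exact this
    · -- nonempty, all digits
      rw [Bool.not_eq_true, Bool.or_eq_false_iff]
      refine ⟨by simpa using hnonnil, ?_⟩
      rw [List.any_eq_false]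
      intro c hc
      have := (List.all_eq_true.mp hdig) c hc
      unfold pvIsDigit at this
      rw [Bool.and_eq_true, decide_eq_true_iff, decide_eq_true_iff] at this
      rw [Bool.not_eq_true, Bool.or_eq_false_iff,
          decide_eq_false_iff_not, decide_eq_false_iff_not]
      exact ⟨not_lt.mpr this.1, not_lt.mpr this.2⟩

-- injectivity of str on naturals
theorem pvToStr_nat_inj {i j : Nat}
    (h : PySem.Int.toStr (i : Int) = PySem.Int.toStr (j : Int)) : i = j := by
  have hl : PySem.Int.toChars (i : Int) = PySem.Int.toChars (j : Int) := by
    simpa [PySem.Int.toStr] using congrArg String.toList h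
  have hi : PySem.Int.toChars (i : Int) = Nat.toDigits 10 i := by
    simp [PySem.Int.toChars]
  have hj : PySem.Int.toChars (j : Int) = Nat.toDigits 10 j := by
    simp [PySem.Int.toChars]
  exact pvDigits_inj (hi ▸ hj ▸ hl)

theorem pvToList_toStr_nat (i : Nat) :
    (PySem.Int.toStr (i : Int)).toList = Nat.toDigits 10 i := by
  rw [PySem.Int.toList_toStr]
  simp [PySem.Int.toChars]

-- str(i) for a natural i, named (proof-side only)
def pvNatStr (i : Nat) : String := PySem.Int.toStr (i : Int)

-- the main equivalence over an arbitrary Nodup key list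
theorem pv_main (K : List String) (hnd : K.Nodup) (hpos : 0 < K.length) :
    ((List.range K.length).all (fun i => decide (PySem.Int.toStr (i : Int) ∈ K)))
      = K.all (fun key =>
          pvKeyOk (PySem.Int.toStr ((K.length : Int) - 1)).toList key.toList) := by
  set n := K.length with hn
  have hbound : (PySem.Int.toStr ((n : Int) - 1)).toList = Nat.toDigits 10 (n - 1) := by
    have : ((n : Int) - 1) = ((n - 1 : Nat) : Int) := by omega
    rw [this, pvToList_toStr_nat]
  rw [hbound]
  set E : List String := (List.range n).map pvNatStr with hE
  have hEnodup : E.Nodup := by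
    rw [hE]
    refine List.Nodup.map ?_ List.nodup_range
    intro i j hij
    exact pvToStr_nat_inj (by simpa [pvNatStr] using hij)
  have hElen : E.length = n := by simp [hE]
  -- membership in E ↔ being a decimal of some i < n
  have hmemE : ∀ key : String, key ∈ E ↔ ∃ i, i < n ∧ key.toList = Nat.toDigits 10 i := by
    intro key
    constructor
    · intro hk
      rcases List.mem_map.1 hk with ⟨i, hi, rfl⟩
      exact ⟨i, List.mem_range.mp hi, pvToList_toStr_nat i⟩
    · rintro ⟨i, hi, hkey⟩
      refine List.mem_map.2 ⟨i, List.mem_range.mpr hi, ?_⟩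
      refine String.toList_inj.mp ?_
      show (PySem.Int.toStr (i : Int)).toList = key.toList
      rw [pvToList_toStr_nat, hkey]
  rw [Bool.eq_iff_iff, List.all_eq_true, List.all_eq_true]
  constructor
  · -- A accepts → every key is some str(i)
    intro h key hkey
    have hEK : E ⊆ K := by
      intro x hx
      rcases List.mem_map.1 hx with ⟨i, hi, rfl⟩
      simpa [pvNatStr] using h i hi
    have hperm : E.Perm K :=
      (List.subperm_of_subset hEnodup hEK).perm_of_length_le (by omega)
    have hkE : key ∈ E := hperm.mem_iff.mpr hkey
    rw [pvKeyOk_iff hpos]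
    exact (hmemE key).mp hkE
  · -- B accepts → every str(i) is a key
    intro h i hi
    have hKE : K ⊆ E := by
      intro key hkey
      have := h key hkey
      rw [pvKeyOk_iff hpos] at this
      exact (hmemE key).mpr this
    have hperm : K.Perm E :=
      (List.subperm_of_subset hnd hKE).perm_of_length_le (by omega)
    have : PySem.Int.toStr (i : Int) ∈ E :=
      (hmemE _).mpr ⟨i, List.mem_range.mp hi, pvToList_toStr_nat i⟩
    simpa using hperm.mem_iff.mpr this

-- ===== VERDICT (by name: the statement is the Claim_ definition above) =====
theorem is_numeric_array_spec : Claim_equal_is_numeric_array := by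
  intro o _
  unfold Spec_is_numeric_array is_numeric_array is_numeric_array_alt
  show (List.range (PySem.Dict.ofList o).keys.length).all
        (fun i => decide (PySem.Int.toStr (i : Int) ∈ (PySem.Dict.ofList o).keys))
      = (if (PySem.Dict.ofList o).size = 0 then true
         else (PySem.Dict.ofList o).keys.all (fun key =>
           pvKeyOk (PySem.Int.toStr (((PySem.Dict.ofList o).size : Int) - 1)).toList
             key.toList))
  have hsize : (PySem.Dict.ofList o).size = (PySem.Dict.ofList o).keys.length := by
    simp [PySem.Dict.size, PySem.Dict.keys]
  rw [hsize]
  by_cases h0 : (PySem.Dict.ofList o).keys.length = 0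
  · rw [if_pos h0, h0]
    simp
  · rw [if_neg h0]
    exact pv_main (PySem.Dict.ofList o).keys (PySem.Dict.nodup_keys_ofList o) (by omega)
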